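-- pv_equiv track=rewrite | github.com/cyocca/advent-of-code | python/adventofcode/2025/day03/solution.py | get_joltages
-- ===== SOURCE A (Python) =====
-- def get_joltages(bank: list[int], joltages: list[int] | None = None, length: int = 1) -> int:
--     new_joltages = [None] * len(bank)
--     cur_max = 0
--
--     # Work backwards.
--     # Keep track of the max joltage to the right of the current position.
--     # The new joltage is the battery at the current position plus the max joltage to
--     # the right.
--     for index in range(len(bank) - length, -1, -1):
--         battery = bank[index]
--         new_joltage = int(f"{battery}{joltages[index + 1]}") if joltages else battery
--
--         cur_max = max(cur_max, new_joltage)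
--         new_joltages[index] = cur_max
--
--     return new_joltages
-- ===== SOURCE B (Python) =====
-- def _running_max(values, floor):
--     """Running maxima of values, never dropping below floor."""
--     maxes = []
--     m = floor
--     for v in values:
--         m = max(m, v)
--         maxes.append(m)
--     return maxes
--
--
-- def get_joltages(bank, joltages=None, length=1):
--     # Pass 1: the covered indices (backwards) and their raw new-joltage values.
--     covered = list(range(len(bank) - length, -1, -1))
--     if joltages:
--         raw = [int(f"{bank[i]}{joltages[i + 1]}") for i in covered]
--     else:
--         raw = [bank[i] for i in covered]
--     # Pass 2: backward running maximum, floored at 0.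
--     maxes = _running_max(raw, 0)
--     # Pass 3: scatter into a None-padded result.
--     out = [None] * len(bank)
--     for i, m in zip(covered, maxes):
--         out[i] = m
--     return out
-- ===== Notes on version B (the rewrite author's own statement) =====
-- stated objective: alternative
-- what changed: Replaces A's single interleaved backward loop (value computation, running max and in-place write per iteration) by three separate passes: build the raw per-index values, take a floored running maximum with a helper, then scatter the maxima into a None-padded result.
import Mathlib
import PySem

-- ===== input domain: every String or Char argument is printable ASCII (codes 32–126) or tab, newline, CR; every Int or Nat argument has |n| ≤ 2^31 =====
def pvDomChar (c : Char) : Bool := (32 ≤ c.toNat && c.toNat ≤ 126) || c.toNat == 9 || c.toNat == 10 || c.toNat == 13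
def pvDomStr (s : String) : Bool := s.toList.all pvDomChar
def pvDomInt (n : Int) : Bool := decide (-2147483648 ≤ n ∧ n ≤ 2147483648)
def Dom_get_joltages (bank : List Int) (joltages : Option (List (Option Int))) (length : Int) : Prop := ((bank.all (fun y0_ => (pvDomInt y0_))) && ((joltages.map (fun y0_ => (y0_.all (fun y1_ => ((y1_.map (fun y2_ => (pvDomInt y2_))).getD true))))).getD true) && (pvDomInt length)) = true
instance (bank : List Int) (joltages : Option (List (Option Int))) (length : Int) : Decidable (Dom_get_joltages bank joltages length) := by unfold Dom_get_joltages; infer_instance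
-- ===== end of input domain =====

-- B separates A's interleaved backward loop into three passes (raw values, floored running maximum, scatter into a None-padded list); same cost, different decomposition.

-- ===== PORT A =====
-- int(f"{battery}{jv}") for an entry jv of joltages (entry none = Python None → ValueError; modelled total, excluded by Pre_)
def pvJoltStr (battery : Int) (jv : Option Int) : Int :=
  match jv with
  | some v => (PySem.Int.ofStr? (PySem.Int.toStr battery ++ PySem.Int.toStr v)).getD 0
  | none => 0

def get_joltages (bank : List Int) (joltages : Option (List (Option Int))) (length : Int) : List (Option Int) :=
  ((PySem.List.pyRange (PySem.List.len bank - length) (-1) (-1)).foldl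
    (fun (st : List (Option Int) × Int) index =>
      let battery := PySem.List.pyGetD bank index 0
      let new_joltage :=
        match joltages with
        | some js => if js.isEmpty then battery
                     else pvJoltStr battery ((PySem.List.pyGet? js (index + 1)).getD none)
        | none => battery
      let cur_max := max st.2 new_joltage
      (PySem.List.pySetD st.1 index (some cur_max), cur_max))
    (List.replicate bank.length none, 0)).1

-- ===== PORT B =====
-- _running_max from Source B: loop with append; state (maxes, m)
def pvRunningMax (values : List Int) (floor : Int) : List Int :=
  (values.foldl (fun (st : List Int × Int) v => (st.1 ++ [max st.2 v], max st.2 v)) ([], floor)).1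

def get_joltages_alt (bank : List Int) (joltages : Option (List (Option Int))) (length : Int) : List (Option Int) :=
  let covered := PySem.List.pyRange (PySem.List.len bank - length) (-1) (-1)
  let raw :=
    match joltages with
    | some js => if js.isEmpty then covered.map (fun i => PySem.List.pyGetD bank i 0)
                 else covered.map (fun i =>
                   pvJoltStr (PySem.List.pyGetD bank i 0) ((PySem.List.pyGet? js (i + 1)).getD none))
    | none => covered.map (fun i => PySem.List.pyGetD bank i 0)
  let maxes := pvRunningMax raw 0
  (covered.zip maxes).foldl (fun out p => PySem.List.pySetD out p.1 (some p.2))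
    (List.replicate bank.length none)

-- ===== PRECONDITION & SPEC =====
-- Pre_ excludes exactly the inputs where Python A raises: length ≤ 0 (bank[index] IndexError for a
-- nonnegative start), and, when joltages is a nonempty list actually consulted, a joltages index
-- out of range (IndexError) or an accessed entry that is None or negative (ValueError in int(...)).
def Pre_get_joltages (bank : List Int) (joltages : Option (List (Option Int))) (length : Int) : Prop :=
  1 ≤ length ∧
  (let js := joltages.getD [];
   js = [] ∨ (bank.length : Int) < length ∨
   ((bank.length : Int) + 2 ≤ (js.length : Int) + length ∧
    ∀ e ∈ (js.drop 1).take (bank.length + 1 - length.toNat), 0 ≤ e.getD (-1)))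
instance (bank : List Int) (joltages : Option (List (Option Int))) (length : Int) : Decidable (Pre_get_joltages bank joltages length) := by unfold Pre_get_joltages; infer_instance

def pvWitness_get_joltages : List Int × Option (List (Option Int)) × Int :=
  ([3, 5], some [some 1, some 7, some 0], 1)

def Spec_get_joltages (bank : List Int) (joltages : Option (List (Option Int))) (length : Int) (out : List (Option Int)) : Prop := out = get_joltages_alt bank joltages length
instance (bank : List Int) (joltages : Option (List (Option Int))) (length : Int) (out : List (Option Int)) : Decidable (Spec_get_joltages bank joltages length out) := by unfold Spec_get_joltages; infer_instance

-- ===== CLAIM (what is proved, stated in full; the proofs are below) =====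
def Claim_equal_get_joltages : Prop := ∀ (bank : List Int) (joltages : Option (List (Option Int))) (length : Int), Dom_get_joltages bank joltages length → Pre_get_joltages bank joltages length → Spec_get_joltages bank joltages length (get_joltages bank joltages length)

-- ===== LEMMAS AND PROOFS =====

-- the foldl-with-append of _running_max peels one element in front
lemma pvRunningMax_aux (vs : List Int) (acc : List Int) (c : Int) :
    (vs.foldl (fun (st : List Int × Int) v => (st.1 ++ [max st.2 v], max st.2 v)) (acc, c)).1
      = acc ++ pvRunningMax vs c := by
  induction vs generalizing acc c with
  | nil => simp [pvRunningMax]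
  | cons v vs ih =>
      simp only [List.foldl_cons, pvRunningMax]
      rw [ih, ih ([] ++ [max c v])]
      simp

lemma pvRunningMax_cons (v : Int) (vs : List Int) (c : Int) :
    pvRunningMax (v :: vs) c = max c v :: pvRunningMax vs (max c v) := by
  simp only [pvRunningMax, List.foldl_cons]
  rw [pvRunningMax_aux]
  simp [pvRunningMax]

-- A's interleaved loop equals B's map + running-max + scatter, for any index list and value function
lemma pvKey (g : Int → Int) (idxs : List Int) (o : List (Option Int)) (c : Int) :
    (idxs.foldl
      (fun (st : List (Option Int) × Int) i =>
        (PySem.List.pySetD st.1 i (some (max st.2 (g i))), max st.2 (g i))) (o, c)).1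
      = (idxs.zip (pvRunningMax (idxs.map g) c)).foldl
          (fun out p => PySem.List.pySetD out p.1 (some p.2)) o := by
  induction idxs generalizing o c with
  | nil => simp [pvRunningMax]
  | cons i idxs ih =>
      simp only [List.foldl_cons, List.map_cons, pvRunningMax_cons, List.zip_cons_cons]
      exact ih _ _

-- ===== VERDICT (by name: the statement is the Claim_ definition above) =====
theorem get_joltages_spec : Claim_equal_get_joltages := by
  intro bank joltages length _ _
  unfold Spec_get_joltages get_joltages get_joltages_alt
  cases joltages with
  | none =>
      simpa using pvKey (fun i => PySem.List.pyGetD bank i 0)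
        (PySem.List.pyRange (PySem.List.len bank - length) (-1) (-1)) (List.replicate bank.length none) 0
  | some js =>
      by_cases h : js.isEmpty
      · simp only [h, if_true]
        simpa using pvKey (fun i => PySem.List.pyGetD bank i 0)
          (PySem.List.pyRange (PySem.List.len bank - length) (-1) (-1)) (List.replicate bank.length none) 0
      · simp only [h, Bool.false_eq_true, if_false]
        simpa using pvKey
          (fun i => pvJoltStr (PySem.List.pyGetD bank i 0) ((PySem.List.pyGet? js (i + 1)).getD none))
          (PySem.List.pyRange (PySem.List.len bank - length) (-1) (-1)) (List.replicate bank.length none) 0
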